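-- pv_equiv track=rewrite | github.com/Julow/Unexpected-Keyboard | gen_sinhala_phonetic_layout.py | is_in_escape_list
-- ===== SOURCE A (Python) =====
-- ESCAPE_LIST: list[int | tuple[int, int]] = [
--     # Sinhalese diacritics
--     (0xD81, 0xD83),
--     (0xDCA, 0xDDF),
-- ]
--
-- def is_in_escape_list(char: str | int) -> bool:
--     if isinstance(char, str):
--         char = ord(char)
--     for item in ESCAPE_LIST:
--         if isinstance(item, tuple) and char >= item[0] and char <= item[1]:
--             return True
--         elif isinstance(item, int):
--             if char == item:
--                 return True
--         else:
--             TypeError(f'Unexpected item {item} of ESCAPE_LIST')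
--     return False
-- ===== SOURCE B (Python) =====
-- ESCAPE_LIST: list[int | tuple[int, int]] = [
--     (0xD81, 0xD83),
--     (0xDCA, 0xDDF),
-- ]
--
-- def _expand(items):
--     s = set()
--     for item in items:
--         if isinstance(item, tuple):
--             s.update(range(item[0], item[1] + 1))
--         else:
--             s.add(item)
--     return frozenset(s)
--
-- ESCAPE_SET = _expand(ESCAPE_LIST)
--
-- def is_in_escape_list(char):
--     if isinstance(char, str):
--         char = ord(char)
--     return char in ESCAPE_SET
-- ===== Notes on version B (the rewrite author's own statement) =====
-- stated objective: idiomatic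
-- what changed: B expands the (lo,hi) ranges of ESCAPE_LIST once into a module-level frozenset of codepoints, so the per-call loop with isinstance dispatch and range comparisons is replaced by a single set-membership test.
import Mathlib
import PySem

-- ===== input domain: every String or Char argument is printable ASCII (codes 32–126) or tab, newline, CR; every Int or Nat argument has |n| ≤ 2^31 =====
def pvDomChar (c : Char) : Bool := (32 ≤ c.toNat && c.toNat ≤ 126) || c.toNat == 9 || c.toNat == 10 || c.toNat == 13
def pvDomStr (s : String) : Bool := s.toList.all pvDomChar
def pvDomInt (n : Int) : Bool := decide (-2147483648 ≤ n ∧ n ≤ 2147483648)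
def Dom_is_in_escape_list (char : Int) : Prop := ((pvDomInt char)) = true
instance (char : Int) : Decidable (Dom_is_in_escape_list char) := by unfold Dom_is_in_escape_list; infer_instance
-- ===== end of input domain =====

-- B replaces A's per-call scan of ESCAPE_LIST (isinstance dispatch + range comparisons)
-- with one membership test in a set of codepoints expanded once from the list (idiomatic; return value only).

-- ===== PORT A =====
-- ESCAPE_LIST: entries are either a bare int (.inl) or a (lo, hi) tuple (.inr)
def pvEscapeList : List (Sum Int (Int × Int)) := [Sum.inr (0xD81, 0xD83), Sum.inr (0xDCA, 0xDDF)]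

-- the for-loop with early returns, as structural recursion over the same list
def pvEscapeLoop (char : Int) : List (Sum Int (Int × Int)) → Bool
  | [] => false
  | item :: rest =>
    match item with
    | Sum.inr (lo, hi) => if char ≥ lo ∧ char ≤ hi then true else pvEscapeLoop char rest
    | Sum.inl n => if char = n then true else pvEscapeLoop char rest
    -- Python's final 'else' only constructs (and discards) a TypeError: a no-op

def is_in_escape_list (char : Int) : Bool := pvEscapeLoop char pvEscapeList

-- ===== PORT B =====
-- _expand: build the set once, adding range(lo, hi+1) for tuples and the bare int otherwise
def pvExpand (items : List (Sum Int (Int × Int))) : PySem.Set Int :=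
  items.foldl (fun s item =>
    match item with
    | Sum.inr (lo, hi) => PySem.Set.update s (PySem.List.pyRange lo (hi + 1) 1)
    | Sum.inl n => PySem.Set.add s n) PySem.Set.empty

def pvEscapeSet : PySem.Set Int := pvExpand pvEscapeList

def is_in_escape_list_alt (char : Int) : Bool := PySem.Set.contains pvEscapeSet char

-- ===== PRECONDITION & SPEC =====
def Spec_is_in_escape_list (char : Int) (out : Bool) : Prop := out = is_in_escape_list_alt char
instance (char : Int) (out : Bool) : Decidable (Spec_is_in_escape_list char out) := by unfold Spec_is_in_escape_list; infer_instance

-- ===== CLAIM (what is proved, stated in full; the proofs are below) =====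
def Claim_equal_is_in_escape_list : Prop := ∀ (char : Int), Dom_is_in_escape_list char → Spec_is_in_escape_list char (is_in_escape_list char)

-- ===== LEMMAS AND PROOFS =====

lemma escapeSet_eq :
    pvEscapeSet = PySem.List.pyRange 0xD81 0xD84 1 ++ PySem.List.pyRange 0xDCA 0xDE0 1 := by
  decide

lemma a_char (char : Int) :
    is_in_escape_list char =
      decide ((0xD81 ≤ char ∧ char ≤ 0xD83) ∨ (0xDCA ≤ char ∧ char ≤ 0xDDF)) := by
  simp [is_in_escape_list, pvEscapeList, pvEscapeLoop]

lemma b_char (char : Int) :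
    is_in_escape_list_alt char =
      decide ((0xD81 ≤ char ∧ char ≤ 0xD83) ∨ (0xDCA ≤ char ∧ char ≤ 0xDDF)) := by
  rw [is_in_escape_list_alt, escapeSet_eq]
  rw [Bool.eq_iff_iff, PySem.Set.contains_iff]
  simp [PySem.List.mem_pyRange_one]
  omega

-- ===== VERDICT (by name: the statement is the Claim_ definition above) =====
theorem is_in_escape_list_spec : Claim_equal_is_in_escape_list := by
  intro char _
  unfold Spec_is_in_escape_list
  rw [a_char, b_char]
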